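-- pv_equiv track=rewrite | github.com/pypi-data/pypi-mirror-309 | packages/genpypress/genpypress-0.1.49-py3-none-any.whl/genpypress/app/app_patch_to_validtime/__init__.py | tpt_line_with_semicolon_above_operator
-- ===== SOURCE A (Python) =====
-- from collections import namedtuple
--
-- LastStatementLine = namedtuple("LastStatementLine", "line_no,offset")
--
-- class PatchError(ValueError):
--     """PatchError: chyba patch procesu"""
--
--     def __init__(self, message):
--         super().__init__(message)
--         self.message = message
--
-- def tpt_line_with_semicolon_above_operator(
--     in_lines: list[str], line_with_to_operator: int
-- ) -> LastStatementLine: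
--     """
--     funkce vrací tupple LastStatementLine
--     - .line_no - číslo řádku, kde končí poslední statement nad TO OPERATOR
--     - .offset - offset, na kterém je středník, nebo apostrof ... tj kde je ukončený statement
--     """
--     last_statement_line = -1
--     for i, line in enumerate(in_lines):
--         line = line.replace(" ", "")
--         if line == ";'" or line == "'":
--             if i > last_statement_line and i <= line_with_to_operator:
--                 last_statement_line = i
--         if i > line_with_to_operator:
--             break
--     if last_statement_line == -1:
--         raise PatchError(
--             f"""Nenašel jsem řádek, který by byl nad `TO OPERATOR`, a který by končil středníkem nebo apostrofem.
--         Číslo řádku : {line_with_to_operator = }"""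
--         )
--
--     offset_apostrof = in_lines[last_statement_line].rfind(";")
--     if offset_apostrof == -1:
--         offset_apostrof = in_lines[last_statement_line].rfind("'")
--     if offset_apostrof == -1:
--         raise PatchError(
--             f"Na řádce {last_statement_line=} jsem nenašel ani středník ani apostrof"
--         )
--
--     return LastStatementLine(line_no=last_statement_line, offset=offset_apostrof)
-- ===== SOURCE B (Python) =====
-- from collections import namedtuple
--
-- LastStatementLine = namedtuple("LastStatementLine", "line_no,offset")
--
--
-- class PatchError(ValueError):
--     def __init__(self, message):
--         super().__init__(message)
--         self.message = message
--
--
-- def tpt_line_with_semicolon_above_operator(in_lines, line_with_to_operator):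
--     # scan backwards from the last candidate line: the first hit is the answer
--     i = min(line_with_to_operator, len(in_lines) - 1)
--     while i >= 0:
--         line = in_lines[i]
--         if line.replace(" ", "") in (";'", "'"):
--             offset = line.rfind(";")
--             if offset == -1:
--                 offset = line.rfind("'")
--             return LastStatementLine(line_no=i, offset=offset)
--         i -= 1
--     raise PatchError("Nenašel jsem řádek nad `TO OPERATOR` končící středníkem nebo apostrofem.")
-- ===== Notes on version B (the rewrite author's own statement) =====
-- stated objective: alternative
-- what changed: A scans the lines forward with an accumulator holding the maximum matching index and a break once past the operator line; B scans backward from min(line_with_to_operator, len-1) and returns at the first statement-ending line, with no accumulator.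
import Mathlib
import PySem

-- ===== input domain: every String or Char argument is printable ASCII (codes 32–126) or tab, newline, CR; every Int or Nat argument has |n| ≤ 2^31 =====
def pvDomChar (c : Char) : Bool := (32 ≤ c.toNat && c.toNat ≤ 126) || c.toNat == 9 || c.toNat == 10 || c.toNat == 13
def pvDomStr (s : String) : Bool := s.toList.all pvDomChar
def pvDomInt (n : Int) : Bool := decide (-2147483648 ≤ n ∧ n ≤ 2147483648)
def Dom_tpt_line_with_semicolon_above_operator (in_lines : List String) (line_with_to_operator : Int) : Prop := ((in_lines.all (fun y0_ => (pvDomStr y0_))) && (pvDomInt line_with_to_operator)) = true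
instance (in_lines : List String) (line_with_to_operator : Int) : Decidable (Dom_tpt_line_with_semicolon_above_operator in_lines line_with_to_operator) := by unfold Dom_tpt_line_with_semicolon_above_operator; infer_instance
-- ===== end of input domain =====

-- B replaces A's forward scan (which tracks the maximum matching index and breaks past the operator line)
-- by a backward scan from min(line_with_to_operator, len-1) that returns at the FIRST hit (objective: alternative decomposition).
-- Both Pythons raise PatchError when no statement-ending line exists above the operator; those inputs are excluded by Pre_.

-- ===== PORT A =====
-- the `for i, line in enumerate(in_lines)` loop of A (with its `break` once i > line_with_to_operator)
def tptALoop (lines : List String) (lwt : Int) (i : Int) (acc : Int) : Int :=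
  match lines with
  | [] => acc
  | line :: rest =>
    let l := PySem.Str.replace line " " ""
    let acc' := if (l == ";'" || l == "'") && (decide (i > acc) && decide (i ≤ lwt)) then i else acc
    if i > lwt then acc' else tptALoop rest lwt (i + 1) acc'

def tpt_line_with_semicolon_above_operator (in_lines : List String) (line_with_to_operator : Int) : Int × Int :=
  let last := tptALoop in_lines line_with_to_operator 0 (-1)
  if last == -1 then (-1, -1)   -- Python raises PatchError here; excluded by Pre_
  else
    -- in_lines[last]: index always in range here (0 ≤ last < length whenever last ≠ -1)
    let line := (PySem.List.pyGet? in_lines last).getD ""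
    let off0 := PySem.Str.rfind line ";"
    let off := if off0 == -1 then PySem.Str.rfind line "'" else off0
    if off == -1 then (-1, -1)  -- Python raises PatchError here (unreachable: proved below)
    else (last, off)

-- ===== PORT B =====
-- the `while i >= 0` backward scan of B
def tptBLoop (lines : List String) (i : Int) : Int × Int :=
  if _h : 0 ≤ i then
    -- in_lines[i]: index always in range when entered from the _alt wrapper (i ≤ len-1)
    let line := (PySem.List.pyGet? lines i).getD ""
    if (PySem.Str.replace line " " "" == ";'" || PySem.Str.replace line " " "" == "'") then
      let off0 := PySem.Str.rfind line ";"
      (i, if off0 == -1 then PySem.Str.rfind line "'" else off0)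
    else tptBLoop lines (i - 1)
  else (-1, -1)  -- loop exhausted: Python raises PatchError; excluded by Pre_
termination_by (i + 1).toNat
decreasing_by simp_wf; omega

def tpt_line_with_semicolon_above_operator_alt (in_lines : List String) (line_with_to_operator : Int) : Int × Int :=
  tptBLoop in_lines (min line_with_to_operator ((in_lines.length : Int) - 1))

-- ===== PRECONDITION & SPEC =====
def pvMatch (line : String) : Bool :=
  let l := PySem.Str.replace line " " ""
  l == ";'" || l == "'"

-- Pre_ excludes exactly the inputs where A raises PatchError: no line at index ≤ line_with_to_operator
-- reduces to ";'" or "'" after removing spaces.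
def Pre_tpt_line_with_semicolon_above_operator (in_lines : List String) (line_with_to_operator : Int) : Prop :=
  ((List.range in_lines.length).any fun j =>
    decide ((j : Int) ≤ line_with_to_operator) && pvMatch (in_lines.getD j "")) = true
instance (in_lines : List String) (line_with_to_operator : Int) : Decidable (Pre_tpt_line_with_semicolon_above_operator in_lines line_with_to_operator) := by unfold Pre_tpt_line_with_semicolon_above_operator; infer_instance

def pvWitness_tpt_line_with_semicolon_above_operator : List String × Int := ([" ;'", "TO OPERATOR"], 1)

def Spec_tpt_line_with_semicolon_above_operator (in_lines : List String) (line_with_to_operator : Int) (out : Int × Int) : Prop := out = tpt_line_with_semicolon_above_operator_alt in_lines line_with_to_operator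
instance (in_lines : List String) (line_with_to_operator : Int) (out : Int × Int) : Decidable (Spec_tpt_line_with_semicolon_above_operator in_lines line_with_to_operator out) := by unfold Spec_tpt_line_with_semicolon_above_operator; infer_instance

-- ===== CLAIM (what is proved, stated in full; the proofs are below) =====
def Claim_equal_tpt_line_with_semicolon_above_operator : Prop := ∀ (in_lines : List String) (line_with_to_operator : Int), Dom_tpt_line_with_semicolon_above_operator in_lines line_with_to_operator → Pre_tpt_line_with_semicolon_above_operator in_lines line_with_to_operator → Spec_tpt_line_with_semicolon_above_operator in_lines line_with_to_operator (tpt_line_with_semicolon_above_operator in_lines line_with_to_operator)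

-- ===== LEMMAS AND PROOFS =====

-- the offset computation both Pythons share (rfind ';' else rfind '\'')
def pvOff (line : String) : Int :=
  let off0 := PySem.Str.rfind line ";"
  if off0 == -1 then PySem.Str.rfind line "'" else off0

theorem pv_find?_congr {α : Type} (l : List α) (p q : α → Bool) (h : ∀ x ∈ l, p x = q x) :
    l.find? p = l.find? q := by
  induction l with
  | nil => rfl
  | cons a t ih =>
    simp only [List.find?]
    rw [h a (by simp)]
    cases q a
    · exact ih fun x hx => h x (by simp [hx])
    · rfl

-- characterisation of A's loop: last matching index ≤ lwt, seen as find? on the reversed index range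
theorem tptALoop_eq (suffix : List String) (lwt : Int) :
    ∀ (i0 acc : Int), acc < i0 →
    tptALoop suffix lwt i0 acc =
      match (List.range suffix.length).reverse.find?
          (fun (k : Nat) => decide (i0 + (k : Int) ≤ lwt) && pvMatch (suffix.getD k "")) with
      | some k => i0 + k
      | none => acc := by
  induction suffix with
  | nil => intro i0 acc _; simp [tptALoop]
  | cons line rest ih =>
    intro i0 acc hacc
    have hgt : decide (i0 > acc) = true := by simp [hacc]
    simp only [tptALoop, hgt, Bool.true_and]
    have hrange : (List.range (line :: rest).length).reverse
        = (List.range rest.length).reverse.map Nat.succ ++ [0] := by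
      simp [List.length_cons, List.range_succ_eq_map, List.map_reverse]
    rw [hrange, List.find?_append, List.find?_map]
    by_cases hbr : i0 > lwt
    · -- break: i0 > lwt, so no index from here on can satisfy k ≤ lwt
      have hle : decide (i0 ≤ lwt) = false := by simp; omega
      rw [if_pos hbr]
      have h1 : (List.range rest.length).reverse.find?
          ((fun (k : Nat) => decide (i0 + (k : Int) ≤ lwt) && pvMatch ((line :: rest).getD k "")) ∘ Nat.succ) = none := by
        rw [List.find?_eq_none]
        intro k _
        simp only [Function.comp, List.getD_cons_succ, Bool.and_eq_true, decide_eq_true_eq]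
        rintro ⟨h, -⟩
        omega
      rw [h1]
      simp only [Option.map_none, Option.none_or, List.find?]
      have h0 : (decide (i0 + ((0 : Nat) : Int) ≤ lwt) && pvMatch ((line :: rest).getD 0 "")) = false := by
        simp only [Nat.cast_zero, Int.add_zero, hle, Bool.false_and]
      rw [h0]
      simp [pvMatch, hle]
    · rw [if_neg hbr]
      have hle : i0 ≤ lwt := by omega
      have hstep : (if (PySem.Str.replace line " " "" == ";'" || PySem.Str.replace line " " "" == "'") && decide (i0 ≤ lwt) then i0 else acc)
          = (if pvMatch line then i0 else acc) := by
        simp [pvMatch, hle]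
      rw [ih (i0 + 1) _ (by split <;> omega)]
      have hpred : ∀ k ∈ (List.range rest.length).reverse,
          (fun (k : Nat) => decide (i0 + 1 + (k : Int) ≤ lwt) && pvMatch (rest.getD k "")) k
          = ((fun (k : Nat) => decide (i0 + (k : Int) ≤ lwt) && pvMatch ((line :: rest).getD k "")) ∘ Nat.succ) k := by
        intro k _
        simp only [Function.comp, List.getD_cons_succ]
        congr 2
        simp only [Nat.cast_succ]
        congr 1
        omega
      rw [pv_find?_congr _ _ _ hpred]
      cases hf : (List.range rest.length).reverse.find?
          ((fun (k : Nat) => decide (i0 + (k : Int) ≤ lwt) && pvMatch ((line :: rest).getD k "")) ∘ Nat.succ) with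
      | some k => simp only [Option.map_some, Option.some_or]; push_cast; ring
      | none =>
        simp only [Option.map_none, Option.none_or, List.find?]
        simp only [Nat.cast_zero, Int.add_zero, List.getD_cons_zero]
        rw [show (decide (i0 ≤ lwt)) = true by simp [hle], Bool.true_and]
        cases hm : pvMatch line with
        | true =>
          have hm' : (PySem.Str.replace line " " "" == ";'" || PySem.Str.replace line " " "" == "'") = true := hm
          simp [hm']
        | false =>
          have hm' : (PySem.Str.replace line " " "" == ";'" || PySem.Str.replace line " " "" == "'") = false := hm
          simp [hm']

-- characterisation of B's loop on an in-range start index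
theorem tptBLoop_eq (lines : List String) :
    ∀ (n : Nat), n < lines.length →
    tptBLoop lines (n : Int) =
      match (List.range (n + 1)).reverse.find? (fun (k : Nat) => pvMatch (lines.getD k "")) with
      | some k => ((k : Int), pvOff (lines.getD k ""))
      | none => (-1, -1) := by
  intro n
  induction n with
  | zero =>
    intro h
    rw [tptBLoop]
    rw [dif_pos (by simp : (0:Int) ≤ ((0:Nat):Int))]
    have hget : (PySem.List.pyGet? lines (((0:Nat)):Int)).getD "" = lines.getD 0 "" := by
      rw [PySem.List.pyGet?_natCast, List.getD_eq_getElem?_getD]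
    simp only [hget]
    simp only [List.range_succ, List.range_zero, List.nil_append, List.reverse_cons,
      List.reverse_nil, List.find?]
    cases hm : pvMatch (lines.getD 0 "") with
    | true =>
      have hm' : (PySem.Str.replace (lines.getD 0 "") " " "" == ";'" || PySem.Str.replace (lines.getD 0 "") " " "" == "'") = true := hm
      simp only [hm, hm']
      norm_num [pvOff]
    | false =>
      have hm' : (PySem.Str.replace (lines.getD 0 "") " " "" == ";'" || PySem.Str.replace (lines.getD 0 "") " " "" == "'") = false := hm
      simp only [List.getD_eq_getElem?_getD] at hm hm'
      simp at hm'
      simp [hm, hm'.1, hm'.2]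
      rw [tptBLoop]
      norm_num
  | succ m ih =>
    intro h
    rw [tptBLoop]
    rw [dif_pos (by positivity : (0:Int) ≤ ((m+1:Nat):Int))]
    have hget : (PySem.List.pyGet? lines (((m+1:Nat)):Int)).getD "" = lines.getD (m+1) "" := by
      rw [PySem.List.pyGet?_natCast, List.getD_eq_getElem?_getD]
    simp only [hget]
    have hrev : (List.range (m+1+1)).reverse = (m+1) :: (List.range (m+1)).reverse := by
      rw [List.range_succ, List.reverse_append]; rfl
    rw [hrev]
    simp only [List.find?]
    cases hm : pvMatch (lines.getD (m+1) "") with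
    | true =>
      have hm' : (PySem.Str.replace (lines.getD (m+1) "") " " "" == ";'" || PySem.Str.replace (lines.getD (m+1) "") " " "" == "'") = true := hm
      simp only [hm, hm']
      norm_num [pvOff]
    | false =>
      have hm' : (PySem.Str.replace (lines.getD (m+1) "") " " "" == ";'" || PySem.Str.replace (lines.getD (m+1) "") " " "" == "'") = false := hm
      simp only [List.getD_eq_getElem?_getD] at hm hm'
      simp at hm'
      simp [hm, hm'.1, hm'.2]
      simpa using ih (by omega)

-- predicates equal on the low range: the k ≤ lwt conjunct is redundant for k ≤ n ≤ lwt
theorem pv_find?_low (lines : List String) (lwt : Int) (n : Nat) (hnl : (n : Int) ≤ lwt) :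
    (List.range (n+1)).reverse.find? (fun (k : Nat) => decide ((k : Int) ≤ lwt) && pvMatch (lines.getD k ""))
      = (List.range (n+1)).reverse.find? (fun (k : Nat) => pvMatch (lines.getD k "")) := by
  apply pv_find?_congr
  intro k hk
  simp only [List.mem_reverse, List.mem_range] at hk
  have : ((k : Int) ≤ lwt) := by omega
  simp [this]

-- indices above lwt never match the A-side predicate, so the scanned range can be cut at n = lwt
theorem pv_find?_hi (lines : List String) (lwt : Int) (n : Nat) (hlw : (n : Int) = lwt) :
    ∀ d : Nat, (List.range (n+1+d)).reverse.find? (fun (k : Nat) => decide ((k : Int) ≤ lwt) && pvMatch (lines.getD k ""))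
      = (List.range (n+1)).reverse.find? (fun (k : Nat) => pvMatch (lines.getD k "")) := by
  intro d
  induction d with
  | zero => exact pv_find?_low lines lwt n (by omega)
  | succ e ihe =>
    rw [show n+1+(e+1) = (n+1+e)+1 by ring, List.range_succ, List.reverse_append]
    have hhd : (fun (k : Nat) => decide ((k : Int) ≤ lwt) && pvMatch (lines.getD k "")) (n+1+e) = false := by
      have hc : (decide (((n+1+e : Nat) : Int) ≤ lwt)) = false := by
        simp only [decide_eq_false_iff_not]
        push_cast; omega
      simp only [hc, Bool.false_and]
    simp only [List.reverse_cons, List.reverse_nil, List.nil_append, List.singleton_append,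
      List.find?, hhd]
    exact ihe

-- every character of `line.replace(" ", "")` is a character of `line`
theorem pv_replace_go_mem : ∀ (fuel : Nat) (l acc : List Char) (c : Char),
    c ∈ PySem.Chars.replace.go [' '] [] fuel l acc → c ∈ acc ∨ c ∈ l := by
  intro fuel
  induction fuel with
  | zero =>
    intro l acc c h
    rw [PySem.Chars.replace.go.eq_def] at h
    simp at h
    tauto
  | succ f ihf =>
    intro l acc c h
    rw [PySem.Chars.replace.go.eq_def] at h
    cases l with
    | nil => simp at h; tauto
    | cons a t =>
      simp only [List.length_cons, List.length_nil, List.reverse_nil, List.nil_append] at h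
      by_cases hp : [' '].isPrefixOf (a :: t) = true
      · rw [if_pos hp] at h
        simp only [List.drop_succ_cons, List.drop_zero] at h
        rcases ihf _ _ _ h with h1 | h1
        · exact Or.inl h1
        · exact Or.inr (List.mem_cons_of_mem _ h1)
      · rw [if_neg hp] at h
        rcases ihf _ _ _ h with h1 | h1
        · rcases List.mem_cons.mp h1 with h2 | h2
          · exact Or.inr (h2 ▸ List.mem_cons_self)
          · exact Or.inl h2
        · exact Or.inr (List.mem_cons_of_mem _ h1)

theorem pv_mem_of_mem_replace (s : List Char) (c : Char) (h : c ∈ PySem.Chars.replace s [' '] []) : c ∈ s := by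
  unfold PySem.Chars.replace at h
  simp only [List.isEmpty_cons, if_false, Bool.false_eq_true] at h
  rcases pv_replace_go_mem _ _ _ _ h with h1 | h1
  · exact absurd h1 (List.not_mem_nil)
  · exact h1

-- a matching line contains an apostrophe
theorem pv_apos_mem (line : String) (h : pvMatch line = true) : '\'' ∈ line.toList := by
  have h' : (PySem.Str.replace line " " "" == ";'") = true ∨ (PySem.Str.replace line " " "" == "'") = true := by
    have := h
    unfold pvMatch at this
    simp only [Bool.or_eq_true] at this
    exact this
  have hrepl : ∀ t : String, PySem.Str.replace line " " "" = t → '\'' ∈ t.toList → '\'' ∈ line.toList := by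
    intro t het hmem
    apply pv_mem_of_mem_replace line.toList
    have : (PySem.Str.replace line " " "").toList = PySem.Chars.replace line.toList [' '] [] := by
      simpa using PySem.Str.toList_replace line " " ""
    rw [← this, het]
    exact hmem
  rcases h' with h1 | h1
  · exact hrepl ";'" (by simpa using h1) (by decide)
  · exact hrepl "'" (by simpa using h1) (by decide)

theorem pv_rfind_go_nonneg (s sub : List Char) :
    ∀ (n k : Nat), k ≤ n → sub.isPrefixOf (s.drop k) = true → 0 ≤ PySem.Chars.rfind.go s sub n := by
  intro n
  induction n with
  | zero =>
    intro k hk hp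
    rw [PySem.Chars.rfind.go.eq_def]
    have : k = 0 := by omega
    subst this
    simp only [List.drop_zero] at hp
    simp [hp]
  | succ m ihm =>
    intro k hk hp
    rw [PySem.Chars.rfind.go.eq_def]
    simp only
    by_cases hp2 : sub.isPrefixOf (s.drop (m+1)) = true
    · rw [if_pos hp2]; omega
    · rw [if_neg hp2]
      rcases Nat.lt_or_ge k (m+1) with h1 | h1
      · exact ihm k (by omega) hp
      · have : k = m + 1 := by omega
        subst this
        exact absurd hp hp2

theorem pv_rfind_apos_nonneg (line : String) (h : pvMatch line = true) :
    0 ≤ PySem.Str.rfind line "'" := by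
  have hm := pv_apos_mem line h
  obtain ⟨k, hk, hget⟩ := List.getElem_of_mem hm
  rw [PySem.Str.rfind_eq]
  have hsub : (("'" : String)).toList = ['\''] := by decide
  rw [hsub]
  unfold PySem.Chars.rfind
  have hpre : (['\''] : List Char).isPrefixOf (line.toList.drop k) = true := by
    rw [List.drop_eq_getElem_cons hk, hget]
    simp [List.isPrefixOf]
  exact pv_rfind_go_nonneg line.toList ['\''] line.toList.length k (by omega) hpre

-- the offset both programs compute is never -1 on a matching line (A's second raise is unreachable)
theorem pv_off_ne (line : String) (h : pvMatch line = true) : (pvOff line == (-1 : Int)) = false := by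
  unfold pvOff
  cases h0 : (PySem.Str.rfind line ";" == (-1 : Int)) with
  | true =>
    simp only [h0]
    rw [if_pos trivial]
    have := pv_rfind_apos_nonneg line h
    simp only [beq_eq_false_iff_ne, ne_eq]
    omega
  | false =>
    simp only [h0]
    rw [if_neg (by simp)]
    exact h0

-- ===== VERDICT (by name: the statement is the Claim_ definition above) =====
theorem tpt_line_with_semicolon_above_operator_spec : Claim_equal_tpt_line_with_semicolon_above_operator := by
  intro in_lines lwt hdom hpre
  unfold Spec_tpt_line_with_semicolon_above_operator
  unfold Pre_tpt_line_with_semicolon_above_operator at hpre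
  rw [List.any_eq_true] at hpre
  obtain ⟨j, hjr, hjp⟩ := hpre
  rw [List.mem_range] at hjr
  rw [Bool.and_eq_true, decide_eq_true_eq] at hjp
  obtain ⟨hj1, hj2⟩ := hjp
  have hlwt : (0 : Int) ≤ lwt := le_trans (by positivity) hj1
  have hlen1 : 1 ≤ in_lines.length := by omega
  have hm0 : (0 : Int) ≤ min lwt ((in_lines.length : Int) - 1) := le_min hlwt (by omega)
  set n : Nat := (min lwt ((in_lines.length : Int) - 1)).toNat with hn
  have hmn : (n : Int) = min lwt ((in_lines.length : Int) - 1) := Int.toNat_of_nonneg hm0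
  have hnlen : n < in_lines.length := by
    have := min_le_right lwt ((in_lines.length : Int) - 1)
    omega
  have hnlwt : (n : Int) ≤ lwt := by
    have := min_le_left lwt ((in_lines.length : Int) - 1)
    omega
  have hsplit : (n : Int) = lwt ∨ n + 1 = in_lines.length := by
    rcases min_choice lwt ((in_lines.length : Int) - 1) with h | h
    · left; omega
    · right; omega
  -- the two loops compute the same find? over the reversed index range
  have hF : (List.range in_lines.length).reverse.find?
        (fun (k : Nat) => decide ((0 : Int) + (k : Int) ≤ lwt) && pvMatch (in_lines.getD k ""))
      = (List.range (n+1)).reverse.find? (fun (k : Nat) => pvMatch (in_lines.getD k "")) := by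
    rw [pv_find?_congr _ _ (fun (k : Nat) => decide ((k : Int) ≤ lwt) && pvMatch (in_lines.getD k ""))
        (by intro k _; simp)]
    rcases hsplit with h | h
    · obtain ⟨d, hd⟩ : ∃ d, in_lines.length = n + 1 + d := ⟨in_lines.length - (n+1), by omega⟩
      rw [hd]
      exact pv_find?_hi in_lines lwt n h d
    · rw [← h]
      exact pv_find?_low in_lines lwt n hnlwt
  have hA := tptALoop_eq in_lines lwt 0 (-1) (by omega)
  rw [hF] at hA
  have hB : tpt_line_with_semicolon_above_operator_alt in_lines lwt
      = match (List.range (n+1)).reverse.find? (fun (k : Nat) => pvMatch (in_lines.getD k "")) with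
        | some k => ((k : Int), pvOff (in_lines.getD k ""))
        | none => (-1, -1) := by
    unfold tpt_line_with_semicolon_above_operator_alt
    rw [← hmn]
    exact tptBLoop_eq in_lines n hnlen
  unfold tpt_line_with_semicolon_above_operator
  rw [hB, hA]
  cases hG : (List.range (n+1)).reverse.find? (fun (k : Nat) => pvMatch (in_lines.getD k "")) with
  | none => simp
  | some k =>
    have hk : pvMatch (in_lines.getD k "") = true := by
      have := List.find?_some hG
      simpa using this
    have hkmem : k ∈ (List.range (n+1)).reverse := List.mem_of_find?_eq_some hG
    have hklen : k < in_lines.length := by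
      rw [List.mem_reverse, List.mem_range] at hkmem
      omega
    simp only
    have hz : ∀ x : Int, (0 : Int) + x = x := fun x => by ring
    rw [hz]
    have hke : (((k : Nat) : Int) == (-1 : Int)) = false := by
      simp only [beq_eq_false_iff_ne, ne_eq]
      omega
    simp only [hke, Bool.false_eq_true, if_false]
    have hline : (PySem.List.pyGet? in_lines (((k : Nat)) : Int)).getD "" = in_lines.getD k "" := by
      rw [PySem.List.pyGet?_natCast, List.getD_eq_getElem?_getD]
    rw [hline]
    rw [show (if (PySem.Str.rfind (in_lines.getD k "") ";" == (-1:Int)) = true then PySem.Str.rfind (in_lines.getD k "") "'" else PySem.Str.rfind (in_lines.getD k "") ";") = pvOff (in_lines.getD k "") from rfl]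
    have hoff := pv_off_ne (in_lines.getD k "") hk
    simp only [hoff, Bool.false_eq_true, if_false]
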